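-- pv_equiv track=rewrite | github.com/ingenii-solutions/azure-data-platform-databricks-runtime | ingenii_databricks/dbt_utils.py | find_forward_nodes
-- ===== SOURCE A (Python) =====
-- def find_forward_nodes(dependents_tree: dict, starting_id: str) -> set:
--     """
--     From a starting point, find all the nodes that depend on this node
--
--     Parameters
--     ----------
--     dependents_tree : dict
--         All the nodes that depend on the node
--     starting_id : str
--         The id of the node to start from
--
--     Returns
--     -------
--     set
--         All the node in the tree related to this node
--     """
--     all_nodes = set()
--     dependent_nodes = [starting_id]
--
--     while dependent_nodes:
--         all_nodes.update(dependent_nodes)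
--         dependent_nodes = [
--             dep
--             for node_id in dependent_nodes
--             for dep in dependents_tree.get(node_id, [])
--         ]
--
--     return all_nodes
-- ===== SOURCE B (Python) =====
-- def find_forward_nodes(dependents_tree: dict, starting_id: str) -> set:
--     """BFS that expands each node once: a visited set plus a frontier of
--     newly-discovered nodes only; terminates even on cyclic dependency graphs."""
--     all_nodes = {starting_id}
--     frontier = [starting_id]
--     while frontier:
--         next_frontier = []
--         for node_id in frontier:
--             for dep in dependents_tree.get(node_id, []):
--                 if dep not in all_nodes:
--                     all_nodes.add(dep)
--                     next_frontier.append(dep)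
--         frontier = next_frontier
--     return all_nodes
-- ===== Notes on version B (the rewrite author's own statement) =====
-- stated objective: alternative
-- what changed: A re-expands every node of the current level list (including already-visited ones, duplicates and all) each iteration and loops forever on cycles; B is a standard BFS that expands each node exactly once via a visited set and terminates on every input. Pre_ excludes exactly the inputs where A never returns (a cycle reachable from starting_id makes A's while-loop run forever); B returns the reachable set there.
import Mathlib
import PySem

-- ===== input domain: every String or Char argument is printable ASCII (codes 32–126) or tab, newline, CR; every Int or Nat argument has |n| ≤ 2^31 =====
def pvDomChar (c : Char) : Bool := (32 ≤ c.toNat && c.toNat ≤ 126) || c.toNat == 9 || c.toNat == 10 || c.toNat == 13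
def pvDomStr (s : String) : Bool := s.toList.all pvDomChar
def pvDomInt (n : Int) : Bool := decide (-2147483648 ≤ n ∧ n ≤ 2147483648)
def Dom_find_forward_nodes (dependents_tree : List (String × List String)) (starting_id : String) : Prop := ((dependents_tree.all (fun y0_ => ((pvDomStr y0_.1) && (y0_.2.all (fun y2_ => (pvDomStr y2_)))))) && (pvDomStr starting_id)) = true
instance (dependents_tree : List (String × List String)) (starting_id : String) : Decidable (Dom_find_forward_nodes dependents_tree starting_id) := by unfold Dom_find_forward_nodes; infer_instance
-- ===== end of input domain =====

-- B replaces A's level-by-level re-expansion of ALL current nodes by a BFS that expands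
-- each node at most once through a visited set (objective: alternative algorithm; unlike
-- A, B also terminates when a cycle is reachable from starting_id).

-- ===== PORT A =====
-- dependents_tree.get(node_id, [])
def pvDeps (dependents_tree : List (String × List String)) (node_id : String) : List String :=
  PySem.Dict.getD (PySem.Dict.mk dependents_tree) node_id []

-- the 'while dependent_nodes:' loop; the fuel only makes the recursion total,
-- Pre_ guarantees it is never exhausted
def pvALoop (dependents_tree : List (String × List String)) :
    Nat → PySem.Set String → List String → PySem.Set String
  | 0, all_nodes, _ => all_nodes
  | fuel + 1, all_nodes, dependent_nodes =>
    if dependent_nodes.isEmpty then all_nodes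
    else pvALoop dependents_tree fuel (PySem.Set.update all_nodes dependent_nodes)
           (dependent_nodes.flatMap (pvDeps dependents_tree))

def find_forward_nodes (dependents_tree : List (String × List String)) (starting_id : String) : List String :=
  pvALoop dependents_tree (dependents_tree.length + 3) PySem.Set.empty [starting_id]

-- ===== PORT B =====
-- the two inner 'for' loops of Source B: expand one frontier node, collecting unseen deps
def pvBStep (dependents_tree : List (String × List String))
    (st : PySem.Set String × List String) (node_id : String) :
    PySem.Set String × List String :=
  (pvDeps dependents_tree node_id).foldl
    (fun st dep =>
      if PySem.Set.contains st.1 dep then st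
      else (PySem.Set.add st.1 dep, st.2 ++ [dep]))
    st

-- Source B's 'while frontier:' loop; the fuel only makes the recursion total
def pvBLoop (dependents_tree : List (String × List String)) :
    Nat → PySem.Set String → List String → PySem.Set String
  | 0, all_nodes, _ => all_nodes
  | fuel + 1, all_nodes, frontier =>
    if frontier.isEmpty then all_nodes
    else
      let st := frontier.foldl (pvBStep dependents_tree) (all_nodes, [])
      pvBLoop dependents_tree fuel st.1 st.2

def find_forward_nodes_alt (dependents_tree : List (String × List String)) (starting_id : String) : List String :=
  pvBLoop dependents_tree
    (dependents_tree.length + (dependents_tree.map (fun p => p.2.length)).sum + 3)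
    (PySem.Set.add PySem.Set.empty starting_id) [starting_id]

-- ===== PRECONDITION & SPEC =====
-- pvWalk d k a b: there is a walk of length k from a to b along the dependency edges
def pvWalk (dependents_tree : List (String × List String)) : Nat → String → String → Bool
  | 0, a, b => a == b
  | k + 1, a, b => (pvDeps dependents_tree a).any (fun c => pvWalk dependents_tree k c b)

-- Pre_ excludes exactly the inputs on which Python A never returns: its while-loop runs
-- forever precisely when some walk of length (number of entries)+1 leaves starting_id,
-- i.e. when a cycle is reachable from starting_id. (Equivalently: no key x with a walk
-- of length |tree| from starting_id to x still has outgoing edges.)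
def Pre_find_forward_nodes (dependents_tree : List (String × List String)) (starting_id : String) : Prop :=
  ∀ x ∈ dependents_tree.map Prod.fst,
    ¬ (pvWalk dependents_tree dependents_tree.length starting_id x = true ∧
       pvDeps dependents_tree x ≠ [])

instance (dependents_tree : List (String × List String)) (starting_id : String) : Decidable (Pre_find_forward_nodes dependents_tree starting_id) := by unfold Pre_find_forward_nodes; infer_instance

def pvWitness_find_forward_nodes : (List (String × List String)) × String :=
  ([("a", ["b"]), ("b", [])], "a")

def Spec_find_forward_nodes (dependents_tree : List (String × List String)) (starting_id : String) (out : List String) : Prop := out = find_forward_nodes_alt dependents_tree starting_id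
instance (dependents_tree : List (String × List String)) (starting_id : String) (out : List String) : Decidable (Spec_find_forward_nodes dependents_tree starting_id out) := by unfold Spec_find_forward_nodes; infer_instance

-- ===== CLAIM (what is proved, stated in full; the proofs are below) =====
def Claim_equal_find_forward_nodes : Prop := ∀ (dependents_tree : List (String × List String)) (starting_id : String), Dom_find_forward_nodes dependents_tree starting_id → Pre_find_forward_nodes dependents_tree starting_id → Spec_find_forward_nodes dependents_tree starting_id (find_forward_nodes dependents_tree starting_id)

-- ===== LEMMAS AND PROOFS =====

-- pvNew S L: the elements of L not in S, first occurrences, in order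
def pvNew : List String → List String → List String
  | _, [] => []
  | S, x :: xs => if x ∈ S then pvNew S xs else x :: pvNew (S ++ [x]) xs

-- pvExpand d acc us: final accumulator and list of newly discovered nodes after
-- expanding the nodes of us in order, starting from seen-set acc
def pvExpand (dependents_tree : List (String × List String)) :
    List String → List String → List String × List String
  | acc, [] => (acc, [])
  | acc, u :: us =>
    let nn := pvNew acc (pvDeps dependents_tree u)
    let r := pvExpand dependents_tree (acc ++ nn) us
    (r.1, nn ++ r.2)

theorem pv_add_eq (S : List String) (x : String) :
    PySem.Set.add S x = if x ∈ S then S else S ++ [x] := by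
  by_cases h : x ∈ S <;> simp [PySem.Set.add, PySem.Set.contains, h]

theorem pv_update_eq (L S : List String) :
    PySem.Set.update S L = S ++ pvNew S L := by
  induction L generalizing S with
  | nil => simp [PySem.Set.update, pvNew]
  | cons x xs ih =>
    have step : PySem.Set.update S (x :: xs) = PySem.Set.update (PySem.Set.add S x) xs := rfl
    by_cases h : x ∈ S
    · rw [step, pv_add_eq, if_pos h, ih]
      simp [pvNew, h]
    · rw [step, pv_add_eq, if_neg h, ih]
      simp [pvNew, h, List.append_assoc]

theorem pvNew_append (A B S : List String) :
    pvNew S (A ++ B) = pvNew S A ++ pvNew (S ++ pvNew S A) B := by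
  induction A generalizing S with
  | nil => simp [pvNew]
  | cons x xs ih =>
    by_cases h : x ∈ S
    · simp [pvNew, h, ih]
    · simp [pvNew, h, ih (S ++ [x]), List.append_assoc]

theorem pvNew_nil_of_subset {L S : List String} (h : ∀ x ∈ L, x ∈ S) :
    pvNew S L = [] := by
  induction L with
  | nil => rfl
  | cons x xs ih =>
    have hx : x ∈ S := h x (by simp)
    simp [pvNew, hx]
    exact ih (fun y hy => h y (by simp [hy]))

theorem subset_of_pvNew_nil {L S : List String} (h : pvNew S L = []) :
    ∀ x ∈ L, x ∈ S := by
  induction L generalizing S with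
  | nil => simp
  | cons x xs ih =>
    by_cases hx : x ∈ S
    · simp only [pvNew, hx, if_pos] at h
      intro y hy
      rcases List.mem_cons.mp hy with rfl | hy'
      · exact hx
      · exact ih h y hy'
    · simp [pvNew, hx] at h

theorem mem_append_pvNew {L S : List String} (x : String) (hx : x ∈ L) :
    x ∈ S ++ pvNew S L := by
  induction L generalizing S with
  | nil => cases hx
  | cons y ys ih =>
    by_cases hy : y ∈ S
    · rcases List.mem_cons.mp hx with rfl | hx'
      · simp [pvNew, hy]
      · simpa [pvNew, hy] using ih hx'
    · rcases List.mem_cons.mp hx with rfl | hx'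
      · simp [pvNew, hy]
      · have := ih (S := S ++ [y]) hx'
        simp only [pvNew, hy, if_neg, not_false_iff]
        simp only [List.append_assoc, List.singleton_append] at this ⊢
        simpa using this

theorem pvExpand_fst (d : List (String × List String)) (us acc : List String) :
    (pvExpand d acc us).1 = acc ++ (pvExpand d acc us).2 := by
  induction us generalizing acc with
  | nil => simp [pvExpand]
  | cons u us ih => simp [pvExpand, ih, List.append_assoc]

theorem pvExpand_snd (d : List (String × List String)) (us acc : List String) :
    (pvExpand d acc us).2 = pvNew acc (us.flatMap (pvDeps d)) := by
  induction us generalizing acc with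
  | nil => simp [pvExpand, pvNew]
  | cons u us ih => simp [pvExpand, List.flatMap_cons, pvNew_append, ih]

theorem acc_subset_pvExpand (d : List (String × List String)) (us acc : List String)
    {z : String} (hz : z ∈ acc) : z ∈ (pvExpand d acc us).1 := by
  rw [pvExpand_fst]; exact List.mem_append_left _ hz

theorem deps_subset_pvExpand (d : List (String × List String)) (us acc : List String)
    {u : String} (hu : u ∈ us) {y : String} (hy : y ∈ pvDeps d u) :
    y ∈ (pvExpand d acc us).1 := by
  induction us generalizing acc with
  | nil => cases hu
  | cons v vs ih =>
    rcases List.mem_cons.mp hu with rfl | hu'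
    · show y ∈ (pvExpand d (acc ++ pvNew acc (pvDeps d u)) vs).1
      exact acc_subset_pvExpand d vs _ (mem_append_pvNew y hy)
    · exact ih (acc ++ pvNew acc (pvDeps d v)) hu' 

theorem pv_inner_fold (_d : List (String × List String)) (l acc out : List String) :
    l.foldl (fun st dep =>
        if PySem.Set.contains st.1 dep then st
        else (PySem.Set.add st.1 dep, st.2 ++ [dep])) (acc, out)
      = (acc ++ pvNew acc l, out ++ pvNew acc l) := by
  induction l generalizing acc out with
  | nil => simp [pvNew]
  | cons x xs ih =>
    rw [List.foldl_cons]
    by_cases h : x ∈ acc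
    · rw [if_pos (by simpa [PySem.Set.contains] using h)]
      rw [ih acc out]
      simp [pvNew, h]
    · rw [if_neg (by simpa [PySem.Set.contains] using h), pv_add_eq, if_neg h]
      rw [ih (acc ++ [x]) (out ++ [x])]
      simp [pvNew, h, List.append_assoc]

theorem pv_fold_pvBStep (d : List (String × List String)) (us acc out : List String) :
    us.foldl (pvBStep d) (acc, out)
      = ((pvExpand d acc us).1, out ++ (pvExpand d acc us).2) := by
  induction us generalizing acc out with
  | nil => simp [pvExpand]
  | cons u us ih =>
    rw [List.foldl_cons]
    have hstep : pvBStep d (acc, out) u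
        = (acc ++ pvNew acc (pvDeps d u), out ++ pvNew acc (pvDeps d u)) :=
      pv_inner_fold d (pvDeps d u) acc out
    rw [hstep, ih]
    show _ = ((pvExpand d acc (u :: us)).1, out ++ (pvExpand d acc (u :: us)).2)
    simp only [pvExpand]
    simp [List.append_assoc]

theorem pv_main (d : List (String × List String)) (L S acc : List String)
    (h : ∀ x ∈ S, ∀ y ∈ pvDeps d x, y ∈ acc) :
    pvExpand d acc (pvNew S L) = pvExpand d acc L := by
  induction L generalizing S acc with
  | nil => rfl
  | cons x xs ih =>
    by_cases hx : x ∈ S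
    · have hdep : pvNew acc (pvDeps d x) = [] :=
        pvNew_nil_of_subset (fun y hy => h x hx y hy)
      calc pvExpand d acc (pvNew S (x :: xs))
          = pvExpand d acc (pvNew S xs) := by simp [pvNew, hx]
        _ = pvExpand d acc xs := ih S acc h
        _ = pvExpand d acc (x :: xs) := by simp [pvExpand, hdep]
    · have h' : ∀ z ∈ S ++ [x], ∀ y ∈ pvDeps d z,
          y ∈ acc ++ pvNew acc (pvDeps d x) := by
        intro z hz y hy
        rcases List.mem_append.mp hz with hz' | hz'
        · exact List.mem_append_left _ (h z hz' y hy)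
        · rcases List.mem_singleton.mp hz' with rfl
          exact mem_append_pvNew y hy
      calc pvExpand d acc (pvNew S (x :: xs))
          = pvExpand d acc (x :: pvNew (S ++ [x]) xs) := by simp [pvNew, hx]
        _ = pvExpand d acc (x :: xs) := by
            simp only [pvExpand]
            rw [ih (S ++ [x]) _ h']

theorem pvWalk_succ (d : List (String × List String)) (k : Nat) (a b : String) :
    pvWalk d (k + 1) a b = true ↔
      ∃ c, pvWalk d k a c = true ∧ b ∈ pvDeps d c := by
  induction k generalizing a with
  | zero =>
    simp only [pvWalk, List.any_eq_true, beq_iff_eq]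
    constructor
    · rintro ⟨c, hc, rfl⟩; exact ⟨a, by simp, hc⟩
    · rintro ⟨c, hc, hb⟩; rw [eq_comm] at hc; subst hc; exact ⟨b, hb, rfl⟩
  | succ k ih =>
    have hun : ∀ (m : Nat) (a b : String),
        pvWalk d (m + 1) a b = (pvDeps d a).any (fun c => pvWalk d m c b) :=
      fun _ _ _ => rfl
    constructor
    · intro h
      rw [hun, List.any_eq_true] at h
      obtain ⟨e, he, hw⟩ := h
      obtain ⟨c, hc, hb⟩ := (ih e).mp hw
      refine ⟨c, ?_, hb⟩
      rw [hun, List.any_eq_true]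
      exact ⟨e, he, hc⟩
    · rintro ⟨c, hc, hb⟩
      rw [hun, List.any_eq_true] at hc ⊢
      obtain ⟨e, he, hw⟩ := hc
      exact ⟨e, he, (ih e).mpr ⟨c, hw, hb⟩⟩

theorem pv_key_of_deps_ne_nil (d : List (String × List String)) {c : String}
    (h : pvDeps d c ≠ []) : c ∈ d.map Prod.fst := by
  by_contra hc
  apply h
  apply PySem.Dict.getD_of_not_contains
  rw [PySem.Dict.contains_eq_decide_mem_keys, PySem.Dict.keys_mk]
  simpa using hc

theorem pv_no_long_walk {d : List (String × List String)} {s : String}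
    (hpre : Pre_find_forward_nodes d s) (x : String) :
    pvWalk d (d.length + 1) s x ≠ true := by
  intro h
  obtain ⟨c, hc, hx⟩ := (pvWalk_succ d d.length s x).mp h
  have hne : pvDeps d c ≠ [] := fun hnil => by simp [hnil] at hx
  exact hpre c (pv_key_of_deps_ne_nil d hne) ⟨hc, hne⟩

theorem pv_frozen (d : List (String × List String)) (s : String)
    (hpre : Pre_find_forward_nodes d s) :
    ∀ (f k : Nat) (S L : List String),
      (∀ x ∈ S, ∀ y ∈ pvDeps d x, y ∈ S) →
      (∀ x ∈ L, x ∈ S) →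
      (∀ x ∈ L, pvWalk d k s x = true) →
      k ≤ d.length + 1 →
      pvALoop d f S L = S := by
  intro f
  induction f with
  | zero => intro k S L _ _ _ _; rfl
  | succ f ih =>
    intro k S L hclo hsub hwalk hk
    by_cases hL : L = []
    · subst hL; simp [pvALoop]
    · have hkn : k ≤ d.length := by
        rcases Nat.lt_or_ge k (d.length + 1) with h | h
        · omega
        · exfalso
          obtain ⟨x, hx⟩ := List.exists_mem_of_ne_nil L hL
          have : k = d.length + 1 := le_antisymm hk h
          exact pv_no_long_walk hpre x (this ▸ hwalk x hx)
      have hupd : PySem.Set.update S L = S := by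
        rw [pv_update_eq, pvNew_nil_of_subset hsub, List.append_nil]
      simp only [pvALoop]
      have hemp : L.isEmpty = false := by
        cases L with
        | nil => exact absurd rfl hL
        | cons a as => rfl
      rw [hemp]
      simp only [Bool.false_eq_true, if_false]
      rw [hupd]
      apply ih (k + 1)
      · exact hclo
      · intro x hx
        obtain ⟨u, hu, hxu⟩ := List.mem_flatMap.mp hx
        exact hclo u (hsub u hu) x hxu
      · intro x hx
        obtain ⟨u, hu, hxu⟩ := List.mem_flatMap.mp hx
        exact (pvWalk_succ d k s x).mpr ⟨u, hwalk u hu, hxu⟩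
      · omega

theorem pv_lockstep (d : List (String × List String)) (s : String)
    (hpre : Pre_find_forward_nodes d s) :
    ∀ (fA fB k : Nat) (S L all F : List String),
      F = pvNew S L →
      all = S ++ F →
      (∀ x ∈ S, ∀ y ∈ pvDeps d x, y ∈ all) →
      (∀ x ∈ L, pvWalk d k s x = true) →
      k ≤ d.length + 1 →
      d.length + 3 ≤ k + fA →
      d.length + 3 ≤ k + fB →
      pvALoop d fA S L = pvBLoop d fB all F := by
  intro fA
  induction fA with
  | zero =>
    intro fB k S L all F _ _ _ _ hk hfa _
    omega
  | succ fA ih =>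
    intro fB k S L all F hF hall hclo hwalk hk hfa hfb
    match fB, hfb with
    | 0, hfb => omega
    | g + 1, hfb =>
    by_cases hL : L = []
    · subst hL
      have hF' : F = [] := by simpa [pvNew] using hF
      subst hF'
      subst hall
      simp [pvALoop, pvBLoop]
    · by_cases hFnil : F = []
      · have hallS : all = S := by simp [hall, hFnil]
        have hBend : pvBLoop d (g + 1) all F = all := by
          subst hFnil; simp [pvBLoop]
        rw [hBend, hallS]
        apply pv_frozen d s hpre (fA + 1) k S L
        · intro x hx y hy
          have := hclo x hx y hy
          rwa [hallS] at this
        · exact subset_of_pvNew_nil (hF ▸ hFnil) 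
        · exact hwalk
        · exact hk
      · have hkn : k ≤ d.length := by
          rcases Nat.lt_or_ge k (d.length + 1) with h | h
          · omega
          · exfalso
            obtain ⟨x, hx⟩ := List.exists_mem_of_ne_nil L hL
            have hke : k = d.length + 1 := le_antisymm hk h
            exact pv_no_long_walk hpre x (hke ▸ hwalk x hx)
        have hempL : L.isEmpty = false := by
          cases L with
          | nil => exact absurd rfl hL
          | cons a as => rfl
        have hempF : F.isEmpty = false := by
          cases F with
          | nil => exact absurd rfl hFnil
          | cons a as => rfl
        have hupd : PySem.Set.update S L = all := by
          rw [pv_update_eq, ← hF, ← hall]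
        have hmain : pvExpand d all F = pvExpand d all L := by
          rw [hF]
          exact pv_main d L S all hclo
        simp only [pvALoop, pvBLoop, hempL, hempF, Bool.false_eq_true, if_false]
        rw [hupd, pv_fold_pvBStep]
        simp only [List.nil_append]
        apply ih (g) (k + 1) all (L.flatMap (pvDeps d))
        · rw [hmain, pvExpand_snd]
        · rw [pvExpand_fst]
        · intro x hx y hy
          rcases List.mem_append.mp (hall ▸ hx) with hxS | hxF
          · rw [pvExpand_fst]
            exact List.mem_append_left _ (hclo x hxS y hy)
          · exact deps_subset_pvExpand d F all hxF hy
        · intro x hx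
          obtain ⟨u, hu, hxu⟩ := List.mem_flatMap.mp hx
          exact (pvWalk_succ d k s x).mpr ⟨u, hwalk u hu, hxu⟩
        · omega
        · omega
        · omega

-- ===== VERDICT (by name: the statement is the Claim_ definition above) =====
theorem find_forward_nodes_spec : Claim_equal_find_forward_nodes := by
  intro d s _ hpre
  unfold Spec_find_forward_nodes find_forward_nodes find_forward_nodes_alt
  have hadd : PySem.Set.add PySem.Set.empty s = [s] := by
    simp
  rw [hadd]
  apply pv_lockstep d s hpre (d.length + 3)
      (d.length + (d.map (fun p => p.2.length)).sum + 3) 0 [] [s] [s] [s]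
  · simp [pvNew]
  · simp
  · intro x hx; cases hx
  · intro x hx
    rcases List.mem_singleton.mp hx with rfl
    simp [pvWalk]
  · omega
  · omega
  · omega
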